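-- pv_equiv track=rewrite | github.com/akarande0906/leetcode75 | companies/meta/Practice_tests/seating_arrangement.py | minOverallAwkwardness
-- ===== SOURCE A (Python) =====
-- from collections import deque
--
-- def minOverallAwkwardness(arr):
--     new_arr = deque([])
--     max_dist = 0
--     arr.sort()
--     for i in range(len(arr)):
--         if i % 2 == 0:
--             if i > 0:
--                 max_dist = max(max_dist, arr[i] - new_arr[-1])
--             new_arr.append(arr[i])
--         else:
--             max_dist = max(max_dist, arr[i] - new_arr[0])
--             new_arr.appendleft(arr[i])
--     print (new_arr)
--     return max_dist
-- ===== SOURCE B (Python) =====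
-- from collections import deque
--
-- def minOverallAwkwardness(arr):
--     arr.sort()
--     n = len(arr)
--     max_dist = arr[1] - arr[0] if n >= 2 else 0
--     for i in range(2, n):
--         max_dist = max(max_dist, arr[i] - arr[i - 2])
--     print(deque(arr[1::2][::-1] + arr[0::2]))
--     return max_dist
-- ===== Notes on version B (the rewrite author's own statement) =====
-- stated objective: simpler
-- what changed: B drops the alternating deque simulation: after sorting it computes the result directly in one index loop as the maximum of the gap between the two smallest elements and the gaps between elements two positions apart, and builds the printed seating order by slicing (reversed odd positions then even positions) instead of per-element appendleft/append.
import Mathlib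
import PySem

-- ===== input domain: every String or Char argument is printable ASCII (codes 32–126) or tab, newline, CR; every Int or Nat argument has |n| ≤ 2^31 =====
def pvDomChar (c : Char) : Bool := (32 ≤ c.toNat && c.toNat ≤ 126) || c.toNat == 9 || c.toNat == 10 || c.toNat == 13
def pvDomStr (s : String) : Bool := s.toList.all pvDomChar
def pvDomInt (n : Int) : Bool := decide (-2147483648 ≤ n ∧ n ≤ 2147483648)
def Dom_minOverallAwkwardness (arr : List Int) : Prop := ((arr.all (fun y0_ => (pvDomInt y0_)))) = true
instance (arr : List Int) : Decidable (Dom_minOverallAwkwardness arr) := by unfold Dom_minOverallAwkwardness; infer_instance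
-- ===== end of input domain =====

-- B replaces A's alternating deque simulation by a direct index loop for the max gap (simpler);
-- both Pythons sort arr in place and print the seating deque — equivalence here is about the RETURN value only.

-- ===== PORT A =====
-- A's loop body, step for step: deque as a List (append = ++ [x], appendleft = ::),
-- new_arr[-1]/new_arr[0] via pyGetD (the deque is provably nonempty at those accesses, so exact).
def pvStepA (s : List Int) (st : List Int × Int) (i : Int) : List Int × Int :=
  if i % 2 = 0 then
    (st.1 ++ [PySem.List.pyGetD s i 0],
     if 0 < i then max st.2 (PySem.List.pyGetD s i 0 - PySem.List.pyGetD st.1 (-1) 0) else st.2)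
  else
    (PySem.List.pyGetD s i 0 :: st.1,
     max st.2 (PySem.List.pyGetD s i 0 - PySem.List.pyGetD st.1 0 0))

def minOverallAwkwardness (arr : List Int) : Int :=
  let s := PySem.List.sorted arr (fun x => x) false
  ((PySem.List.pyRange 0 (s.length : Int) 1).foldl (pvStepA s) ([], 0)).2

-- ===== PORT B =====
-- B's loop body: max over arr[i] - arr[i-2].
def pvStepB (s : List Int) (md : Int) (i : Int) : Int :=
  max md (PySem.List.pyGetD s i 0 - PySem.List.pyGetD s (i - 2) 0)

def minOverallAwkwardness_alt (arr : List Int) : Int :=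
  let s := PySem.List.sorted arr (fun x => x) false
  let init := if 2 ≤ s.length then PySem.List.pyGetD s 1 0 - PySem.List.pyGetD s 0 0 else 0
  (PySem.List.pyRange 2 (s.length : Int) 1).foldl (pvStepB s) init

-- ===== PRECONDITION & SPEC =====
def Spec_minOverallAwkwardness (arr : List Int) (out : Int) : Prop := out = minOverallAwkwardness_alt arr
instance (arr : List Int) (out : Int) : Decidable (Spec_minOverallAwkwardness arr out) := by unfold Spec_minOverallAwkwardness; infer_instance

-- ===== CLAIM (what is proved, stated in full; the proofs are below) =====
def Claim_equal_minOverallAwkwardness : Prop := ∀ (arr : List Int), Dom_minOverallAwkwardness arr → Spec_minOverallAwkwardness arr (minOverallAwkwardness arr)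

-- ===== LEMMAS AND PROOFS =====

-- A's loop as a structural recursion over the iteration count.
def pvA (s : List Int) : Nat → List Int × Int
  | 0 => ([], 0)
  | n + 1 => pvStepA s (pvA s n) (n : Int)

-- A's max_dist after n iterations, closed recursion (Nat subtraction: at n = 1, n-2 = 0 = the head index Python uses).
def pvM (s : List Int) : Nat → Int
  | 0 => 0
  | n + 1 => if n = 0 then 0 else max (pvM s n) (s.getD n 0 - s.getD (n - 2) 0)

lemma pvFoldA (s : List Int) : ∀ n : Nat,
    (PySem.List.pyRange 0 (n : Int) 1).foldl (pvStepA s) ([], 0) = pvA s n := by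
  intro n
  induction n with
  | zero => simp [pvA]
  | succ n ih =>
    have h : ((n : Int) + 1) = ((n + 1 : Nat) : Int) := by push_cast; ring
    rw [pvA, ← ih, ← h, PySem.List.pyRange_one_succ_right (by positivity), List.foldl_append]
    rfl

lemma pvInvA (s : List Int) : ∀ n : Nat, 1 ≤ n →
    (pvA s n).1 ≠ [] ∧
    PySem.List.pyGetD (pvA s n).1 (-1) 0 = s.getD (if n % 2 = 1 then n - 1 else n - 2) 0 ∧
    PySem.List.pyGetD (pvA s n).1 0 0 = s.getD (if n % 2 = 0 then n - 1 else n - 2) 0 ∧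
    (pvA s n).2 = pvM s n := by
  intro n
  induction n with
  | zero => omega
  | succ n ih =>
    intro _
    by_cases hn : n = 0
    · subst hn
      have hstep : pvA s 1 = ([PySem.List.pyGetD s 0 0], 0) := by
        simp only [pvA, pvStepA]
        norm_num
      rw [hstep]
      refine ⟨by simp, ?_, ?_, rfl⟩
      · rw [show ([PySem.List.pyGetD s 0 0] : List Int) = [] ++ [PySem.List.pyGetD s 0 0] from rfl,
          PySem.List.pyGetD_neg_one_append_singleton]
        simp [PySem.List.pyGetD_zero]
      · simp [PySem.List.pyGetD_zero]
    · obtain ⟨hne, hlast, hhead, hm⟩ := ih (by omega)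
      by_cases hp : n % 2 = 0
      · -- iteration n is even (n ≥ 2): append on the right
        have hstep : pvA s (n + 1) = ((pvA s n).1 ++ [PySem.List.pyGetD s (n : Int) 0],
            max (pvA s n).2 (PySem.List.pyGetD s (n : Int) 0 - PySem.List.pyGetD (pvA s n).1 (-1) 0)) := by
          simp only [pvA, pvStepA]
          rw [if_pos (by omega : ((n : Int)) % 2 = 0), if_pos (by omega : (0 : Int) < (n : Int))]
        rw [hstep]
        dsimp only
        refine ⟨by simp, ?_, ?_, ?_⟩
        · rw [PySem.List.pyGetD_neg_one_append_singleton]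
          simp [(by omega : (n + 1) % 2 = 1)]
        · have h1 : ¬ (n + 1) % 2 = 0 := by omega
          have h2 : n + 1 - 2 = n - 1 := by omega
          rcases hL : (pvA s n).1 with _ | ⟨a, l⟩
          · exact absurd hL hne
          · rw [hL] at hhead
            simpa [h1, h2, hp, PySem.List.pyGetD_zero] using hhead
        · rw [pvM, if_neg hn, hm, hlast]
          simp [hp]
      · -- iteration n is odd: prepend on the left
        have hstep : pvA s (n + 1) = (PySem.List.pyGetD s (n : Int) 0 :: (pvA s n).1,
            max (pvA s n).2 (PySem.List.pyGetD s (n : Int) 0 - PySem.List.pyGetD (pvA s n).1 0 0)) := by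
          simp only [pvA, pvStepA]
          rw [if_neg (by omega : ¬ ((n : Int)) % 2 = 0)]
        rw [hstep]
        dsimp only
        refine ⟨by simp, ?_, ?_, ?_⟩
        · have h1 : ¬ (n + 1) % 2 = 1 := by omega
          have h2 : n + 1 - 2 = n - 1 := by omega
          have h4 : n % 2 = 1 := by omega
          have hc : (PySem.List.pyGetD s (n : Int) 0 :: (pvA s n).1) ≠ [] := by simp
          rw [PySem.List.pyGetD_neg_one _ 0 hc, List.getLast_cons hne]
          rw [PySem.List.pyGetD_neg_one _ 0 hne] at hlast
          rw [hlast]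
          simp [h1, h2, h4]
        · rw [PySem.List.pyGetD_zero_cons, if_pos (by omega : (n + 1) % 2 = 0),
            show n + 1 - 1 = n from rfl]
          simp
        · rw [pvM, if_neg hn, hm, hhead]
          simp [hp]

-- B's fold never goes below its initial accumulator.
lemma pvLeFoldB (s : List Int) : ∀ (l : List Int) (init : Int), init ≤ l.foldl (pvStepB s) init := by
  intro l
  induction l with
  | nil => intro init; simp
  | cons x xs ih =>
    intro init
    exact le_trans (le_max_left _ _) (ih (pvStepB s init x))

-- pvM agrees with B's fold up to a max with 0.
lemma pvMeqB (s : List Int) : ∀ n : Nat, 2 ≤ n →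
    pvM s n = max 0 ((PySem.List.pyRange 2 (n : Int) 1).foldl (pvStepB s)
      (PySem.List.pyGetD s 1 0 - PySem.List.pyGetD s 0 0)) := by
  intro n
  induction n with
  | zero => omega
  | succ n ih =>
    intro _
    by_cases hn : n = 1
    · subst hn
      have hr : PySem.List.pyRange 2 (2 : Int) 1 = [] := PySem.List.pyRange_one_eq_nil (by omega)
      have hpv : pvM s 2 = max 0 (s.getD 1 0 - s.getD 0 0) := by simp [pvM]
      rw [hpv, show ((1 + 1 : Nat) : Int) = (2 : Int) from rfl, hr, List.foldl_nil,
        show (1 : Int) = ((1 : Nat) : Int) from rfl, PySem.List.pyGetD_natCast,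
        PySem.List.pyGetD_zero]
    · have h2 : 2 ≤ n := by omega
      have h : ((n : Int) + 1) = ((n + 1 : Nat) : Int) := by push_cast; ring
      rw [← h, PySem.List.pyRange_one_succ_right (by exact_mod_cast h2), List.foldl_append]
      rw [pvM, if_neg (by omega), ih h2]
      simp only [List.foldl_cons, List.foldl_nil, pvStepB]
      have hcast : ((n : Int) - 2) = ((n - 2 : Nat) : Int) := by omega
      rw [hcast]
      simp only [PySem.List.pyGetD_natCast]
      rw [max_assoc, max_left_comm]

-- sorted list: s[0] ≤ s[1] when 2 ≤ length
lemma pvSortedInit (arr : List Int) :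
    2 ≤ (PySem.List.sorted arr (fun x => x) false).length →
    (PySem.List.sorted arr (fun x => x) false).getD 0 0 ≤
    (PySem.List.sorted arr (fun x => x) false).getD 1 0 := by
  intro h
  set s := PySem.List.sorted arr (fun x => x) false with hs
  have hp : s.Pairwise (fun a b => a ≤ b) := by
    simpa using PySem.List.sorted_pairwise arr (fun x => x)
  rw [List.pairwise_iff_getElem] at hp
  have h0 : 0 < s.length := by omega
  have h1 : 1 < s.length := by omega
  have := hp 0 1 h0 h1 (by omega)
  simpa [List.getD_eq_getElem?_getD, List.getElem?_eq_getElem h0, List.getElem?_eq_getElem h1] using this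

-- ===== VERDICT (by name: the statement is the Claim_ definition above) =====
theorem minOverallAwkwardness_spec : Claim_equal_minOverallAwkwardness := by
  intro arr _
  unfold Spec_minOverallAwkwardness minOverallAwkwardness minOverallAwkwardness_alt
  set s := PySem.List.sorted arr (fun x => x) false with hs
  simp only []
  rw [pvFoldA s s.length]
  by_cases hlen : 2 ≤ s.length
  · obtain ⟨-, -, -, hm⟩ := pvInvA s s.length (by omega)
    rw [hm, pvMeqB s s.length hlen, if_pos hlen]
    have hinit : (0:Int) ≤ PySem.List.pyGetD s 1 0 - PySem.List.pyGetD s 0 0 := by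
      have h01 : List.getD s 0 0 ≤ List.getD s 1 0 := pvSortedInit arr (hs ▸ hlen)
      rw [show (1:Int) = ((1:Nat):Int) from rfl, PySem.List.pyGetD_natCast,
        PySem.List.pyGetD_zero]
      omega
    have hf := le_trans hinit (pvLeFoldB s (PySem.List.pyRange 2 (s.length : Int) 1)
      (PySem.List.pyGetD s 1 0 - PySem.List.pyGetD s 0 0))
    omega
  · rw [if_neg hlen]
    interval_cases h : s.length
    · simp [pvA]
    · obtain ⟨-, -, -, hm⟩ := pvInvA s 1 (by omega)
      rw [show s.length = 1 from h] at *
      rw [hm]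
      simp [pvM, PySem.List.pyRange_one_eq_nil (by omega : (1:Int) ≤ 2)]
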